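-- pv_equiv track=rewrite | github.com/mhems/aoc | 2024/day20/a.py | build_gridmap
-- ===== SOURCE A (Python) =====
-- def build_gridmap(grid: [str]) -> ((int, int), (int, int), {(int, int)}, {(int, int)}):
--     start = None
--     end = None
--     walls = set()
--     path = set()
--     Y, X = len(grid), len(grid[0])
--     for y, row in enumerate(grid):
--         for x, cell in enumerate(row):
--             if cell == '#':
--                 if 0 < y < Y - 1 and 0 < x < X - 1:
--                     walls.add((y, x))
--             else:
--                 if cell == 'S':
--                     start = (y, x)
--                 elif cell == 'E':
--                     end = (y, x)
--                 path.add((y, x))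
--     return start, end, walls, path
-- ===== SOURCE B (Python) =====
-- def build_gridmap(grid: [str]) -> ((int, int), (int, int), {(int, int)}, {(int, int)}):
--     Y, X = len(grid), len(grid[0])
--     cells = [((y, x), c) for y, row in enumerate(grid) for x, c in enumerate(row)]
--     path = {p for p, c in cells if c != '#'}
--     walls = {p for p, c in cells
--              if c == '#' and 0 < p[0] < Y - 1 and 0 < p[1] < X - 1}
--     start = next((p for p, c in reversed(cells) if c == 'S'), None)
--     end = next((p for p, c in reversed(cells) if c == 'E'), None)
--     return start, end, walls, path
-- ===== Notes on version B (the rewrite author's own statement) =====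
-- stated objective: alternative
-- what changed: Replaces the single stateful nested loop with a flattened cell list processed by independent passes: set comprehensions for path and walls, and reverse scans (next on reversed, matching A's last-assignment-wins) for start and end.
import Mathlib
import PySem

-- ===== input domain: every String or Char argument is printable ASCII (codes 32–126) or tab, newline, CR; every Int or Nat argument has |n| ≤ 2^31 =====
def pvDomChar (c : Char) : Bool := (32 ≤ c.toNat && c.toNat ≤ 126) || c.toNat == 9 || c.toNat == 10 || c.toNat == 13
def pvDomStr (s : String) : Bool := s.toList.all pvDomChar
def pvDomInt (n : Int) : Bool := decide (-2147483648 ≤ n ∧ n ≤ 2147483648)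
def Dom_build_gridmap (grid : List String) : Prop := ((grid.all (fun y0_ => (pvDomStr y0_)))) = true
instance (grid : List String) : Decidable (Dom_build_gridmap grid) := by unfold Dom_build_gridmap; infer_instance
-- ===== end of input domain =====

-- B replaces A's single stateful nested loop by a flattened (coordinate, char) cell list
-- processed in independent passes (filter/map for path and walls, reverse find for start/end);
-- same return value, same cost (alternative decomposition, not claimed faster).


-- ===== PORT A =====
def build_gridmap (grid : List String) : (Option (Int × Int)) × (Option (Int × Int)) × (List (Int × Int)) × (List (Int × Int)) :=
  match grid[0]? with
  | none => (none, none, [], [])  -- Python raises IndexError on grid[0]; excluded by Pre_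
  | some row0 =>
    let Y : Int := grid.length
    let X : Int := row0.toList.length
    (PySem.List.enumerate grid).foldl (fun s yr =>
      (PySem.List.enumerate yr.2.toList).foldl (fun s xc =>
        if xc.2 = '#' then
          if 0 < yr.1 ∧ yr.1 < Y - 1 ∧ 0 < xc.1 ∧ xc.1 < X - 1 then
            (s.1, s.2.1, PySem.Set.add s.2.2.1 (yr.1, xc.1), s.2.2.2)
          else s
        else
          let s1 : (Option (Int × Int)) × (Option (Int × Int)) × (List (Int × Int)) × (List (Int × Int)) :=
            if xc.2 = 'S' then (some (yr.1, xc.1), s.2.1, s.2.2.1, s.2.2.2)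
            else if xc.2 = 'E' then (s.1, some (yr.1, xc.1), s.2.2.1, s.2.2.2)
            else s
          (s1.1, s1.2.1, s1.2.2.1, PySem.Set.add s1.2.2.2 (yr.1, xc.1))
      ) s) (none, none, [], [])

-- ===== PORT B =====
-- flattened cell list: [((y, x), c) for y, row in enumerate(grid) for x, c in enumerate(row)]
def pvCells (grid : List String) : List ((Int × Int) × Char) :=
  (PySem.List.enumerate grid).flatMap (fun yr =>
    (PySem.List.enumerate yr.2.toList).map (fun xc => ((yr.1, xc.1), xc.2)))

def pvWallP (Y X : Int) (pc : (Int × Int) × Char) : Bool :=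
  pc.2 == '#' && decide (0 < pc.1.1 ∧ pc.1.1 < Y - 1 ∧ 0 < pc.1.2 ∧ pc.1.2 < X - 1)

def pvPathP (pc : (Int × Int) × Char) : Bool := pc.2 != '#'

def build_gridmap_alt (grid : List String) : (Option (Int × Int)) × (Option (Int × Int)) × (List (Int × Int)) × (List (Int × Int)) :=
  match grid[0]? with
  | none => (none, none, [], [])  -- Python raises IndexError on grid[0]; excluded by Pre_
  | some row0 =>
    let Y : Int := grid.length
    let X : Int := row0.toList.length
    let cells := pvCells grid
    let path := PySem.Set.ofList ((cells.filter pvPathP).map (·.1))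
    let walls := PySem.Set.ofList ((cells.filter (pvWallP Y X)).map (·.1))
    let start := (cells.reverse.find? (fun pc => pc.2 == 'S')).map (·.1)
    let e := (cells.reverse.find? (fun pc => pc.2 == 'E')).map (·.1)
    (start, e, walls, path)

-- ===== PRECONDITION & SPEC =====
-- Pre_ excludes only the empty grid, on which the Python A (and B) raise IndexError at grid[0].
def Pre_build_gridmap (grid : List String) : Prop := grid ≠ []
instance (grid : List String) : Decidable (Pre_build_gridmap grid) := by unfold Pre_build_gridmap; infer_instance
def pvWitness_build_gridmap : List String := ["###", "#SE", "###"]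

def Spec_build_gridmap (grid : List String) (out : (Option (Int × Int)) × (Option (Int × Int)) × (List (Int × Int)) × (List (Int × Int))) : Prop := out = build_gridmap_alt grid
instance (grid : List String) (out : (Option (Int × Int)) × (Option (Int × Int)) × (List (Int × Int)) × (List (Int × Int))) : Decidable (Spec_build_gridmap grid out) := by unfold Spec_build_gridmap; infer_instance

-- ===== CLAIM (what is proved, stated in full; the proofs are below) =====
def Claim_equal_build_gridmap : Prop := ∀ (grid : List String), Dom_build_gridmap grid → Pre_build_gridmap grid → Spec_build_gridmap grid (build_gridmap grid)

-- ===== LEMMAS AND PROOFS =====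

-- A's loop body as a function of one flattened cell (defeq to the inline body of the port).
def pvStepA (Y X : Int) (s : (Option (Int × Int)) × (Option (Int × Int)) × (List (Int × Int)) × (List (Int × Int)))
    (pc : (Int × Int) × Char) : (Option (Int × Int)) × (Option (Int × Int)) × (List (Int × Int)) × (List (Int × Int)) :=
  if pc.2 = '#' then
    if 0 < pc.1.1 ∧ pc.1.1 < Y - 1 ∧ 0 < pc.1.2 ∧ pc.1.2 < X - 1 then
      (s.1, s.2.1, PySem.Set.add s.2.2.1 pc.1, s.2.2.2)
    else s
  else
    let s1 : (Option (Int × Int)) × (Option (Int × Int)) × (List (Int × Int)) × (List (Int × Int)) :=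
      if pc.2 = 'S' then (some pc.1, s.2.1, s.2.2.1, s.2.2.2)
      else if pc.2 = 'E' then (s.1, some pc.1, s.2.2.1, s.2.2.2)
      else s
    (s1.1, s1.2.1, s1.2.2.1, PySem.Set.add s1.2.2.2 pc.1)

-- the four independent component steps
def pvFS (o : Option (Int × Int)) (pc : (Int × Int) × Char) : Option (Int × Int) :=
  if pc.2 = 'S' then some pc.1 else o
def pvFE (o : Option (Int × Int)) (pc : (Int × Int) × Char) : Option (Int × Int) :=
  if pc.2 = 'E' then some pc.1 else o
def pvFW (Y X : Int) (w : List (Int × Int)) (pc : (Int × Int) × Char) : List (Int × Int) :=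
  if pvWallP Y X pc then PySem.Set.add w pc.1 else w
def pvFP (p : List (Int × Int)) (pc : (Int × Int) × Char) : List (Int × Int) :=
  if pvPathP pc then PySem.Set.add p pc.1 else p

lemma pvStepA_point (Y X : Int) (s e : Option (Int × Int)) (w p : List (Int × Int)) (pc : (Int × Int) × Char) :
    pvStepA Y X (s, e, w, p) pc = (pvFS s pc, pvFE e pc, pvFW Y X w pc, pvFP p pc) := by
  simp only [pvStepA, pvFS, pvFE, pvFW, pvFP, pvWallP, pvPathP, Bool.and_eq_true,
    beq_iff_eq, decide_eq_true_eq, bne_iff_ne, ne_eq]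
  split_ifs <;> simp_all

lemma pvA_fold (Y X : Int) (grid : List String)
    (s0 : (Option (Int × Int)) × (Option (Int × Int)) × (List (Int × Int)) × (List (Int × Int))) :
    (PySem.List.enumerate grid).foldl (fun s yr =>
      (PySem.List.enumerate yr.2.toList).foldl (fun s xc =>
        if xc.2 = '#' then
          if 0 < yr.1 ∧ yr.1 < Y - 1 ∧ 0 < xc.1 ∧ xc.1 < X - 1 then
            (s.1, s.2.1, PySem.Set.add s.2.2.1 (yr.1, xc.1), s.2.2.2)
          else s
        else
          let s1 : (Option (Int × Int)) × (Option (Int × Int)) × (List (Int × Int)) × (List (Int × Int)) :=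
            if xc.2 = 'S' then (some (yr.1, xc.1), s.2.1, s.2.2.1, s.2.2.2)
            else if xc.2 = 'E' then (s.1, some (yr.1, xc.1), s.2.2.1, s.2.2.2)
            else s
          (s1.1, s1.2.1, s1.2.2.1, PySem.Set.add s1.2.2.2 (yr.1, xc.1))
      ) s) s0
    = (pvCells grid).foldl (pvStepA Y X) s0 := by
  unfold pvCells
  rw [List.foldl_flatMap]
  simp only [List.foldl_map]
  rfl

lemma pvFold_split (Y X : Int) (l : List ((Int × Int) × Char)) :
    ∀ s e w p, l.foldl (pvStepA Y X) (s, e, w, p)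
      = (l.foldl pvFS s, l.foldl pvFE e, l.foldl (pvFW Y X) w, l.foldl pvFP p) := by
  induction l with
  | nil => intro s e w p; rfl
  | cons a t ih =>
    intro s e w p
    rw [List.foldl_cons, pvStepA_point, List.foldl_cons, List.foldl_cons, List.foldl_cons, List.foldl_cons, ih]

lemma pvLast_fold (c0 : Char) (l : List ((Int × Int) × Char)) :
    ∀ (s : Option (Int × Int)),
      l.foldl (fun o pc => if pc.2 = c0 then some pc.1 else o) s
      = ((l.reverse.find? (fun pc => pc.2 == c0)).map (·.1)).or s := by
  induction l with
  | nil => intro s; rfl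
  | cons a t ih =>
    intro s
    rw [List.foldl_cons, ih, List.reverse_cons, List.find?_append]
    cases h : t.reverse.find? (fun pc => pc.2 == c0) with
    | some v => simp
    | none =>
      cases hb : a.2 == c0 with
      | true => rw [if_pos (beq_iff_eq.mp hb)]; simp [List.find?, hb]
      | false => rw [if_neg (by simpa using hb)]; simp [List.find?, hb]

lemma pvFS_fold (l : List ((Int × Int) × Char)) (s : Option (Int × Int)) :
    l.foldl pvFS s = ((l.reverse.find? (fun pc => pc.2 == 'S')).map (·.1)).or s :=
  pvLast_fold 'S' l s

lemma pvFE_fold (l : List ((Int × Int) × Char)) (s : Option (Int × Int)) :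
    l.foldl pvFE s = ((l.reverse.find? (fun pc => pc.2 == 'E')).map (·.1)).or s :=
  pvLast_fold 'E' l s

lemma pvSet_fold (q : ((Int × Int) × Char) → Bool) (l : List ((Int × Int) × Char)) :
    ∀ (s : List (Int × Int)),
      l.foldl (fun w pc => if q pc then PySem.Set.add w pc.1 else w) s
      = ((l.filter q).map (·.1)).foldl PySem.Set.add s := by
  induction l with
  | nil => intro s; rfl
  | cons a t ih =>
    intro s
    cases h : q a <;> simp [List.foldl_cons, h, ih]

-- ===== VERDICT (by name: the statement is the Claim_ definition above) =====
theorem build_gridmap_spec : Claim_equal_build_gridmap := by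
  intro grid _ hpre
  unfold Spec_build_gridmap
  match hg : grid[0]? with
  | none =>
    exact absurd (by cases grid with | nil => rfl | cons a t => simp at hg) hpre
  | some row0 =>
    simp only [build_gridmap, build_gridmap_alt, hg]
    rw [pvA_fold, pvFold_split, pvFS_fold, pvFE_fold]
    show (_, _, _, _) = (_, _, _, _)
    refine congrArg₂ _ ?_ (congrArg₂ _ ?_ (congrArg₂ _ ?_ ?_))
    · simp
    · simp
    · exact pvSet_fold (pvWallP _ _) _ _
    · exact pvSet_fold pvPathP _ _
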